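-- pv_equiv track=rewrite | github.com/aangerma/algo_ivcam2 | avv/tests/registers_input.py | concatenate_ints
-- ===== SOURCE A (Python) =====
-- def concatenate_ints(nums, type):
--     if "single" in type or "logical" in type:
--         return nums[0]
--     if len(nums) == 1:
--         return nums[0]
--
--     s = ""
--     size = 0
--     if "int2" in type:
--         size = 2
--     elif "int4" in type:
--         size = 4
--     elif "int8" in type:
--         size = 8
--     elif "int12" in type:
--         size = 12
--     elif "int16" in type:
--         size = 16
--     elif "int32" in type:
--         size = 32
--     elif "logical" in type:
--         size = 1
--
--     for i in range(len(nums)):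
--         s = s + format(nums[i] & ((2 ** size) - 1), '0{}b'.format(size))
--
--     return int(s, 2)
-- ===== SOURCE B (Python) =====
-- # Faster (constant factor): same result via an integer accumulator: each element's low `size` bits are
-- # shifted into `result`, instead of building a binary string and re-parsing it
-- # with int(s, 2); the width is picked from a table scan instead of an if-chain.
-- def concatenate_ints(nums, type):
--     if "single" in type or "logical" in type:
--         return nums[0]
--     if len(nums) == 1:
--         return nums[0]
--
--     size = 0
--     for tag, width in (("int2", 2), ("int4", 4), ("int8", 8), ("int12", 12),
--                        ("int16", 16), ("int32", 32), ("logical", 1)):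
--         if tag in type:
--             size = width
--             break
--
--     mask = (1 << size) - 1
--     result = 0
--     for x in nums:
--         result = (result << size) | (x & mask)
--     return result
-- ===== Notes on version B (the rewrite author's own statement) =====
-- stated objective: faster
-- what changed: B accumulates the result arithmetically (result = (result << size) | (x & mask)) instead of building a zero-padded binary string per element and re-parsing the whole string with int(s, 2), and picks the width by scanning a tag table instead of an if/elif chain.
import Mathlib
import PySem

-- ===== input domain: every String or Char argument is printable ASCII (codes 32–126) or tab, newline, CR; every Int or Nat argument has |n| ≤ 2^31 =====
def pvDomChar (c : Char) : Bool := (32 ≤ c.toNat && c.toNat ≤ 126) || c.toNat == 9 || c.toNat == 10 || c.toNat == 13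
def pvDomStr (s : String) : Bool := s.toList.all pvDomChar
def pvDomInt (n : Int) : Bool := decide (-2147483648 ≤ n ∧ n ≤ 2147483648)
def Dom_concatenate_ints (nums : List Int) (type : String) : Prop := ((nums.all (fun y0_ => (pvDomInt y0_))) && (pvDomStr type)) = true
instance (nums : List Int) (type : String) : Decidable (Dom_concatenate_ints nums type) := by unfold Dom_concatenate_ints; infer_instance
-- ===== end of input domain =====

-- B replaces A's build-a-binary-string-then-int(s,2) with a shift/or integer
-- accumulator and a table scan for the width (objective: faster by a constant factor,
-- measured: no per-element formatting and no final string parse).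

-- ===== PORT A =====

-- minimal binary digits of a positive n (most significant first); helper for pvBinDigits
def pvBinCore : Nat → List Char
  | 0 => []
  | n+1 => pvBinCore ((n+1)/2) ++ [if (n+1) % 2 = 1 then '1' else '0']
decreasing_by exact Nat.div_lt_self (Nat.succ_pos n) (by norm_num)

-- hand port of format(n, 'b'), exact for 0 ≤ n (A only formats n = x & mask ≥ 0)
def pvBinDigits (n : Int) : List Char := if n ≤ 0 then ['0'] else pvBinCore n.toNat

-- hand port of format(n, '0{k}b'): left-pad the digits with '0' to width k; exact for 0 ≤ n
def pvFormatBin (k : Nat) (n : Int) : List Char :=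
  let d := pvBinDigits n
  List.replicate (k - d.length) '0' ++ d

-- hand port of int(s, 2), exact on strings matching [01]+ — the only strings A
-- ever passes once Pre_ holds (the loop appends only '0'/'1' characters, and
-- nums ≠ [] keeps s nonempty; int('', 2) raises ValueError outside Pre_)
def pvBinVal (cs : List Char) : Int :=
  cs.foldl (fun a c => 2 * a + (if c = '1' then 1 else 0)) 0

def concatenate_ints (nums : List Int) (type : String) : Int :=
  if PySem.Str.isIn "single" type || PySem.Str.isIn "logical" type then
    (PySem.List.pyGet? nums 0).getD 0     -- nums[0]; none (IndexError) only outside Pre_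
  else if PySem.List.len nums = 1 then
    (PySem.List.pyGet? nums 0).getD 0
  else
    -- Python's size is a nonnegative int from this chain; carried as Nat
    let size : Nat :=
      if PySem.Str.isIn "int2" type then 2
      else if PySem.Str.isIn "int4" type then 4
      else if PySem.Str.isIn "int8" type then 8
      else if PySem.Str.isIn "int12" type then 12
      else if PySem.Str.isIn "int16" type then 16
      else if PySem.Str.isIn "int32" type then 32
      else if PySem.Str.isIn "logical" type then 1
      else 0
    let s : List Char :=
      List.foldl
        (fun s j => s ++ pvFormatBin size (PySem.Int.band (PySem.List.pyGetD nums j 0) ((2:Int)^size - 1)))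
        [] (PySem.List.pyRange 0 (PySem.List.len nums))
    pvBinVal s                            -- int(s, 2)

-- ===== PORT B =====

def pvSizeTags : List (String × Nat) :=
  [("int2", 2), ("int4", 4), ("int8", 8), ("int12", 12), ("int16", 16), ("int32", 32), ("logical", 1)]

def concatenate_ints_alt (nums : List Int) (type : String) : Int :=
  if PySem.Str.isIn "single" type || PySem.Str.isIn "logical" type then
    (PySem.List.pyGet? nums 0).getD 0
  else if PySem.List.len nums = 1 then
    (PySem.List.pyGet? nums 0).getD 0
  else
    -- `for tag, width in …: if tag in type: size = width; break` = first matching entry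
    let size : Nat := ((pvSizeTags.find? (fun p => PySem.Str.isIn p.1 type)).map Prod.snd).getD 0
    let mask : Int := (1 <<< size) - 1
    nums.foldl (fun r x => PySem.Int.bor (r <<< size) (PySem.Int.band x mask)) 0

-- ===== PRECONDITION & SPEC =====

-- Pre_ excludes only nums = []: there A raises (IndexError on the single/logical
-- path, ValueError from int('', 2) otherwise) and returns on everything else.
def Pre_concatenate_ints (nums : List Int) (type : String) : Prop := nums ≠ []
instance (nums : List Int) (type : String) : Decidable (Pre_concatenate_ints nums type) := by
  unfold Pre_concatenate_ints; infer_instance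

def pvWitness_concatenate_ints : List Int × String := ([3, -5], "int4")

def Spec_concatenate_ints (nums : List Int) (type : String) (out : Int) : Prop := out = concatenate_ints_alt nums type
instance (nums : List Int) (type : String) (out : Int) : Decidable (Spec_concatenate_ints nums type out) := by unfold Spec_concatenate_ints; infer_instance

-- ===== CLAIM (what is proved, stated in full; the proofs are below) =====
def Claim_equal_concatenate_ints : Prop := ∀ (nums : List Int) (type : String), Dom_concatenate_ints nums type → Pre_concatenate_ints nums type → Spec_concatenate_ints nums type (concatenate_ints nums type)

-- ===== LEMMAS AND PROOFS =====

theorem pvBinVal_foldl_aux (t : List Char) :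
    ∀ a : Int, t.foldl (fun a c => 2 * a + (if c = '1' then 1 else 0)) a
      = a * 2 ^ t.length + t.foldl (fun a c => 2 * a + (if c = '1' then 1 else 0)) 0 := by
  induction t with
  | nil => intro a; simp
  | cons c t ih =>
    intro a
    simp only [List.foldl_cons, List.length_cons]
    rw [ih (2 * a + _), ih (2 * 0 + _)]
    ring

theorem pvBinVal_append (s t : List Char) :
    pvBinVal (s ++ t) = pvBinVal s * 2 ^ t.length + pvBinVal t := by
  unfold pvBinVal
  rw [List.foldl_append, pvBinVal_foldl_aux t]

theorem pvBinVal_replicate (n : Nat) : pvBinVal (List.replicate n '0') = 0 := by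
  induction n with
  | zero => rfl
  | succ n ih =>
    rw [List.replicate_succ']
    rw [pvBinVal_append, ih]
    simp [pvBinVal]

theorem pvBinCore_val : ∀ n : Nat, pvBinVal (pvBinCore n) = n := by
  intro n
  induction n using Nat.strong_induction_on with
  | _ n ih =>
    match n with
    | 0 => simp [pvBinCore, pvBinVal]
    | n+1 =>
      rw [pvBinCore, pvBinVal_append, ih ((n+1)/2) (Nat.div_lt_self (Nat.succ_pos n) (by norm_num))]
      have h2 : pvBinVal [if (n+1) % 2 = 1 then '1' else '0'] = ((n+1) % 2 : Nat) := by
        rcases Nat.mod_two_eq_zero_or_one (n+1) with h | h <;> simp [pvBinVal, h]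
      rw [h2]
      simp only [List.length_singleton, pow_one]
      have := Nat.div_add_mod (n+1) 2
      push_cast
      omega

theorem pvBinCore_len : ∀ n k : Nat, n < 2 ^ k → (pvBinCore n).length ≤ k := by
  intro n
  induction n using Nat.strong_induction_on with
  | _ n ih =>
    match n with
    | 0 => intro k _; simp [pvBinCore]
    | n+1 =>
      intro k hk
      have hkpos : 0 < k := by
        by_contra h
        interval_cases k
        omega
      have hdiv : (n+1)/2 < 2 ^ (k-1) := by
        have : 2 ^ k = 2 * 2 ^ (k-1) := by
          conv_lhs => rw [show k = (k-1) + 1 by omega]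
          ring
        omega
      have := ih ((n+1)/2) (Nat.div_lt_self (Nat.succ_pos n) (by norm_num)) (k-1) hdiv
      rw [pvBinCore]
      simp only [List.length_append, List.length_singleton]
      omega

-- the masked value x & (2^k - 1) is a k-bit nonnegative integer
theorem pv_band_mask_bounds (x : Int) (k : Nat) :
    0 ≤ PySem.Int.band x ((2:Int) ^ k - 1) ∧ PySem.Int.band x ((2:Int) ^ k - 1) < 2 ^ k := by
  have hmn : ((2:Int) ^ k - 1).toNat = 2 ^ k - 1 := by
    have : ((2:Int) ^ k) = ((2 ^ k : Nat) : Int) := by push_cast; ring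
    omega
  have hp : (1:Nat) ≤ 2 ^ k := Nat.one_le_two_pow
  rw [PySem.Int.band.eq_1]
  split_ifs with h1 h2 h2
  · rw [hmn]
    constructor
    · positivity
    · have := Nat.and_two_pow_sub_one_eq_mod x.toNat k
      have h3 : x.toNat % 2 ^ k < 2 ^ k := Nat.mod_lt _ (by omega)
      have : ((2:Int) ^ k) = ((2 ^ k : Nat) : Int) := by push_cast; ring
      omega
  · exact absurd (by have : (0:Int) < 2 ^ k := by positivity
                     omega : (0:Int) ≤ 2 ^ k - 1) h2
  · rw [hmn]
    constructor
    · positivity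
    · have h3 : (2 ^ k - 1) - (2 ^ k - 1 &&& (-x - 1).toNat) ≤ 2 ^ k - 1 := Nat.sub_le _ _
      have : ((2:Int) ^ k) = ((2 ^ k : Nat) : Int) := by push_cast; ring
      omega
  · exact absurd (by have : (0:Int) < 2 ^ k := by positivity
                     omega : (0:Int) ≤ 2 ^ k - 1) h2

-- disjoint or is addition (Nat)
theorem pv_lor_disjoint : ∀ (k a b : Nat), b < 2 ^ k → (a * 2 ^ k) ||| b = a * 2 ^ k + b := by
  intro k
  induction k with
  | zero => intro a b hb; interval_cases b <;> simp
  | succ k ih =>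
    intro a b hb
    have hb2 : b / 2 < 2 ^ k := by
      have : 2 ^ (k+1) = 2 * 2 ^ k := by ring
      omega
    have hbitb : Nat.bit (decide (b % 2 = 1)) (b / 2) = b := by
      rcases Nat.mod_two_eq_zero_or_one b with h | h <;> simp [Nat.bit, h] <;> omega
    have hbita : Nat.bit false (a * 2 ^ k) = a * 2 ^ (k+1) := by
      simp [Nat.bit]; ring
    calc (a * 2 ^ (k+1)) ||| b
        = Nat.bit false (a * 2 ^ k) ||| Nat.bit (decide (b % 2 = 1)) (b / 2) := by rw [hbitb, hbita]
      _ = Nat.bit (false || decide (b % 2 = 1)) ((a * 2 ^ k) ||| (b / 2)) := Nat.lor_bit _ _ _ _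
      _ = Nat.bit (decide (b % 2 = 1)) (a * 2 ^ k + b / 2) := by rw [ih a (b/2) hb2]; simp
      _ = a * 2 ^ (k+1) + b := by
          have h21 : a * 2 ^ (k+1) = 2 * (a * 2 ^ k) := by ring
          rcases Nat.mod_two_eq_zero_or_one b with h | h <;> simp [Nat.bit, h] <;> omega

-- one B-loop step in arithmetic form
theorem pv_step_arith (k : Nat) (r m : Int) (hr : 0 ≤ r) (hm : 0 ≤ m) (hmk : m < 2 ^ k) :
    PySem.Int.bor (r <<< k) m = r * 2 ^ k + m := by
  rw [Int.shiftLeft_eq]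
  have hrk : (0:Int) ≤ r * 2 ^ k := by positivity
  rw [PySem.Int.bor_of_nonneg hrk hm]
  have h1 : (r * 2 ^ k).toNat = r.toNat * 2 ^ k := by
    have hc : ((2:Int) ^ k) = ((2 ^ k : Nat) : Int) := by push_cast; ring
    have := Int.toNat_of_nonneg hr
    calc (r * 2 ^ k).toNat = ((r.toNat : Int) * ((2 ^ k : Nat) : Int)).toNat := by rw [this, ← hc]
      _ = ((((r.toNat * 2 ^ k : Nat)) : Int)).toNat := by push_cast; ring_nf
      _ = r.toNat * 2 ^ k := Int.toNat_natCast _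
  have h2 : m.toNat < 2 ^ k := by
    have hc : ((2:Int) ^ k) = ((2 ^ k : Nat) : Int) := by push_cast; ring
    omega
  rw [h1, pv_lor_disjoint k r.toNat m.toNat h2]
  push_cast
  rw [Int.toNat_of_nonneg hr, Int.toNat_of_nonneg hm]

-- the appended block has width k and value m (k > 0)
theorem pvFormatBin_spec (k : Nat) (hk : 0 < k) (m : Int) (hm : 0 ≤ m) (hmk : m < 2 ^ k) :
    (pvFormatBin k m).length = k ∧ pvBinVal (pvFormatBin k m) = m := by
  unfold pvFormatBin pvBinDigits
  have hc : ((2:Int) ^ k) = ((2 ^ k : Nat) : Int) := by push_cast; ring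
  by_cases h0 : m ≤ 0
  · have hm0 : m = 0 := le_antisymm h0 hm
    subst hm0
    simp only [if_pos (le_refl (0:Int))]
    constructor
    · simp [List.length_replicate]
      omega
    · rw [pvBinVal_append, pvBinVal_replicate]
      simp [pvBinVal]
  · have hmpos : 0 < m := by omega
    simp only [if_neg h0]
    have hlen : (pvBinCore m.toNat).length ≤ k := pvBinCore_len m.toNat k (by omega)
    constructor
    · simp [List.length_replicate]
      omega
    · rw [pvBinVal_append, pvBinVal_replicate, pvBinCore_val]
      simp
      omega

theorem pvFormatBin_zero (n : Int) (h : n ≤ 0) : pvFormatBin 0 n = ['0'] := by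
  unfold pvFormatBin pvBinDigits
  simp [if_pos h]

-- loop invariant, k > 0: the string's binary value is B's accumulator
theorem pv_loop_eq (k : Nat) (hk : 0 < k) :
    ∀ (l : List Int) (s : List Char) (r : Int), 0 ≤ r → pvBinVal s = r →
      pvBinVal (l.foldl (fun s x => s ++ pvFormatBin k (PySem.Int.band x ((2:Int)^k - 1))) s)
        = l.foldl (fun r x => PySem.Int.bor (r <<< k) (PySem.Int.band x ((2:Int)^k - 1))) r := by
  intro l
  induction l with
  | nil => intro s r _ hs; simpa using hs
  | cons x t ih =>
    intro s r hr hs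
    simp only [List.foldl_cons]
    have hb := pv_band_mask_bounds x k
    have hstep := pv_step_arith k r (PySem.Int.band x ((2:Int)^k - 1)) hr hb.1 hb.2
    have hfs := pvFormatBin_spec k hk (PySem.Int.band x ((2:Int)^k - 1)) hb.1 hb.2
    apply ih
    · rw [hstep]
      have : (0:Int) ≤ r * 2 ^ k := by positivity
      omega
    · rw [pvBinVal_append, hfs.1, hfs.2, hs, hstep]

-- k = 0: every block is "0", every masked value is 0; both sides stay 0
theorem pv_loop_zero_a :
    ∀ (l : List Int) (s : List Char), pvBinVal s = 0 →
      pvBinVal (l.foldl (fun s x => s ++ pvFormatBin 0 (PySem.Int.band x ((2:Int)^0 - 1))) s) = 0 := by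
  intro l
  induction l with
  | nil => intro s hs; simpa using hs
  | cons x t ih =>
    intro s hs
    simp only [List.foldl_cons]
    apply ih
    have : PySem.Int.band x ((2:Int)^0 - 1) = 0 := by norm_num
    rw [this, pvFormatBin_zero 0 le_rfl, pvBinVal_append, hs]
    simp [pvBinVal]

theorem pv_loop_zero_b :
    ∀ (l : List Int) (r : Int),
      l.foldl (fun r x => PySem.Int.bor (r <<< (0:Nat)) (PySem.Int.band x ((2:Int)^0 - 1))) r = r := by
  intro l
  induction l with
  | nil => intro r; rfl
  | cons x t ih =>
    intro r
    simp only [List.foldl_cons]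
    rw [show PySem.Int.band x ((2:Int)^0 - 1) = 0 by norm_num]
    rw [PySem.Int.bor_zero, show r <<< (0:Nat) = r by rw [Int.shiftLeft_eq]; ring]
    exact ih r

-- the whole else-branch: string building + int(s,2) equals the shift/or fold
theorem pv_body_eq (k : Nat) (nums : List Int) :
    pvBinVal (List.foldl
        (fun s j => s ++ pvFormatBin k (PySem.Int.band (PySem.List.pyGetD nums j 0) ((2:Int)^k - 1)))
        [] (PySem.List.pyRange 0 (PySem.List.len nums)))
      = nums.foldl (fun r x => PySem.Int.bor (r <<< k) (PySem.Int.band x (((1:Int) <<< k) - 1))) 0 := by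
  have hmask : ((1:Int) <<< k) - 1 = (2:Int)^k - 1 := by rw [Int.shiftLeft_eq, one_mul]
  simp only [hmask]
  rw [PySem.List.foldl_pyRange_pyGetD nums (0:Int)
      (fun s v => s ++ pvFormatBin k (PySem.Int.band v ((2:Int)^k - 1))) [] (le_refl 0)]
  simp only [Int.toNat_zero, List.drop_zero]
  by_cases hk : k = 0
  · subst hk
    rw [pv_loop_zero_a nums [] rfl, pv_loop_zero_b nums 0]
  · exact pv_loop_eq k (Nat.pos_of_ne_zero hk) nums [] 0 le_rfl rfl

-- A's if-chain picks the same width as B's table scan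
theorem pv_size_eq (type : String) :
    (if PySem.Str.isIn "int2" type then 2
      else if PySem.Str.isIn "int4" type then 4
      else if PySem.Str.isIn "int8" type then 8
      else if PySem.Str.isIn "int12" type then 12
      else if PySem.Str.isIn "int16" type then 16
      else if PySem.Str.isIn "int32" type then 32
      else if PySem.Str.isIn "logical" type then 1
      else 0)
    = (((pvSizeTags.find? (fun p => PySem.Str.isIn p.1 type)).map Prod.snd).getD 0 : Nat) := by
  simp only [pvSizeTags, List.find?]
  split_ifs <;> simp_all

-- ===== VERDICT (by name: the statement is the Claim_ definition above) =====
theorem concatenate_ints_spec : Claim_equal_concatenate_ints := by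
  intro nums type _dom _hpre
  unfold Spec_concatenate_ints concatenate_ints concatenate_ints_alt
  by_cases h1 : (PySem.Str.isIn "single" type || PySem.Str.isIn "logical" type) = true
  · rw [if_pos h1, if_pos h1]
  · rw [if_neg h1, if_neg h1]
    by_cases h2 : PySem.List.len nums = 1
    · rw [if_pos h2, if_pos h2]
    · rw [if_neg h2, if_neg h2]
      rw [← pv_size_eq type]
      exact pv_body_eq _ nums
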